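-- pv_equiv track=rewrite | github.com/Gokul-raaj-5999/Programming_Coding | Codeforce_Coding/1721B - Deadly Laser.py | rbcall
-- ===== SOURCE A (Python) =====
-- def diss(x , y, sx, sy):
--     dis = abs(x-sx) + abs(y-sy)
--     return int(dis)
--
-- def rbcall(n, m, sx, sy, d):
--     for i in range(1, n+1):
--         if diss(i, 1, sx, sy) <= d:
--             return 1
--     for i in range(1, m+1):
--         if diss(n, i, sx, sy) <= d:
--             return 1
--     return 2
-- ===== SOURCE B (Python) =====
-- def rbcall(n, m, sx, sy, d):
--     # O(1): closed-form minimum Manhattan distance from (sx, sy) to the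
--     # column segment {(i, 1) : 1 <= i <= n} and the row segment {(n, i) : 1 <= i <= m}.
--     col_hit = n >= 1 and max(0, 1 - sx, sx - n) + abs(1 - sy) <= d
--     row_hit = m >= 1 and abs(n - sx) + max(0, 1 - sy, sy - m) <= d
--     return 1 if (col_hit or row_hit) else 2
-- ===== Notes on version B (the rewrite author's own statement) =====
-- stated objective: faster
-- what changed: Replaces the two linear scans over the first column and last row by the closed-form minimum Manhattan distance to each border segment (clamp the start point onto the segment's range).
import Mathlib
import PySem

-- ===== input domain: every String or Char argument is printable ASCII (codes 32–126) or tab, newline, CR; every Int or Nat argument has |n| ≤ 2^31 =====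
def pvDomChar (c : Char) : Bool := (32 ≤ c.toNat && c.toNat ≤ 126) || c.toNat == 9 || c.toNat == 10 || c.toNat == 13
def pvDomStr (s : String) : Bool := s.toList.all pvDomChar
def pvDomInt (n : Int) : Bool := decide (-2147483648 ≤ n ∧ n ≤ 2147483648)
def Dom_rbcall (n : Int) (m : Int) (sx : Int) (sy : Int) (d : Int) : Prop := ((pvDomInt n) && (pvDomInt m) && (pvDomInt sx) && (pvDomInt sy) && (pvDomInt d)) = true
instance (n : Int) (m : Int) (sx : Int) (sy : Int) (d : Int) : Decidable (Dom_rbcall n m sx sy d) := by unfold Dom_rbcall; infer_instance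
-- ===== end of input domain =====

-- B replaces A's two O(n)+O(m) scans by the O(1) closed-form minimum Manhattan
-- distance to each border segment (objective: faster, asymptotic).

-- ===== PORT A =====
def diss (x : Int) (y : Int) (sx : Int) (sy : Int) : Int := |x - sx| + |y - sy|

-- the for-loops with early `return 1` are ported as `any` over the same range
def rbcall (n : Int) (m : Int) (sx : Int) (sy : Int) (d : Int) : Int :=
  if (PySem.List.pyRange 1 (n+1) 1).any (fun i => decide (diss i 1 sx sy ≤ d)) then 1
  else if (PySem.List.pyRange 1 (m+1) 1).any (fun i => decide (diss n i sx sy ≤ d)) then 1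
  else 2

-- ===== PORT B =====
def rbcall_alt (n : Int) (m : Int) (sx : Int) (sy : Int) (d : Int) : Int :=
  if (1 ≤ n ∧ max 0 (max (1 - sx) (sx - n)) + |1 - sy| ≤ d)
      ∨ (1 ≤ m ∧ |n - sx| + max 0 (max (1 - sy) (sy - m)) ≤ d) then 1 else 2

-- ===== PRECONDITION & SPEC =====
def Spec_rbcall (n : Int) (m : Int) (sx : Int) (sy : Int) (d : Int) (out : Int) : Prop := out = rbcall_alt n m sx sy d
instance (n : Int) (m : Int) (sx : Int) (sy : Int) (d : Int) (out : Int) : Decidable (Spec_rbcall n m sx sy d out) := by unfold Spec_rbcall; infer_instance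

-- ===== CLAIM (what is proved, stated in full; the proofs are below) =====
def Claim_equal_rbcall : Prop := ∀ (n : Int) (m : Int) (sx : Int) (sy : Int) (d : Int), Dom_rbcall n m sx sy d → Spec_rbcall n m sx sy d (rbcall n m sx sy d)

-- ===== LEMMAS AND PROOFS =====

-- the scan over i ∈ [1, n] hits iff the segment is nonempty and the closed-form
-- minimum of |i - a| over i ∈ [1, n] (plus the constant c) is within d
theorem scan_iff (n a c d : Int) (_hc : 0 ≤ c) :
    (∃ i, (1 ≤ i ∧ i < n + 1) ∧ |i - a| + c ≤ d) ↔
      (1 ≤ n ∧ max 0 (max (1 - a) (a - n)) + c ≤ d) := by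
  constructor
  · rintro ⟨i, ⟨h1, h2⟩, h3⟩
    refine ⟨by omega, ?_⟩
    have h0 : (0:Int) ≤ |i - a| := abs_nonneg _
    have ha : i - a ≤ |i - a| := le_abs_self _
    have hb : -(i - a) ≤ |i - a| := neg_le_abs _
    have : max 0 (max (1 - a) (a - n)) ≤ |i - a| := by
      apply max_le h0
      apply max_le <;> omega
    omega
  · rintro ⟨hn, hd⟩
    refine ⟨min n (max 1 a), ⟨by omega, by omega⟩, ?_⟩
    have : |min n (max 1 a) - a| ≤ max 0 (max (1 - a) (a - n)) := by
      rcases le_total a 1 with h | h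
      · have hmin : min n (max 1 a) = 1 := by omega
        rw [hmin, abs_of_nonneg (by omega)]
        exact le_max_of_le_right (le_max_left _ _)
      · rcases le_total a n with h' | h'
        · have hmin : min n (max 1 a) = a := by omega
          rw [hmin]; simp
        · have hmin : min n (max 1 a) = n := by omega
          rw [hmin, abs_of_nonpos (by omega)]
          have hmx : a - n ≤ max 0 (max (1 - a) (a - n)) :=
            le_max_of_le_right (le_max_right _ _)
          linarith
    omega

-- ===== VERDICT (by name: the statement is the Claim_ definition above) =====
theorem rbcall_spec : Claim_equal_rbcall := by
  intro n m sx sy d _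
  have h1 := scan_iff n sx (|1 - sy|) d (abs_nonneg _)
  have h2' := scan_iff m sy (|n - sx|) d (abs_nonneg _)
  have hA : (((PySem.List.pyRange 1 (n+1) 1).any (fun i => decide (diss i 1 sx sy ≤ d))) = true) ↔
      (1 ≤ n ∧ max 0 (max (1 - sx) (sx - n)) + |1 - sy| ≤ d) := by
    simp only [List.any_eq_true, PySem.List.mem_pyRange_one, decide_eq_true_eq, diss]
    exact h1
  have hB : (((PySem.List.pyRange 1 (m+1) 1).any (fun i => decide (diss n i sx sy ≤ d))) = true) ↔
      (1 ≤ m ∧ |n - sx| + max 0 (max (1 - sy) (sy - m)) ≤ d) := by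
    simp only [List.any_eq_true, PySem.List.mem_pyRange_one, decide_eq_true_eq, diss]
    constructor
    · rintro ⟨i, hi, hle⟩
      have h := h2'.mp ⟨i, hi, by linarith⟩
      exact ⟨h.1, by linarith [h.2]⟩
    · rintro ⟨hm, hle⟩
      obtain ⟨i, hi, hle'⟩ := h2'.mpr ⟨hm, by linarith⟩
      exact ⟨i, hi, by linarith⟩
  unfold Spec_rbcall rbcall rbcall_alt
  by_cases hC : (1 ≤ n ∧ max 0 (max (1 - sx) (sx - n)) + |1 - sy| ≤ d)
  · rw [if_pos (hA.mpr hC), if_pos (Or.inl hC)]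
  · by_cases hD : (1 ≤ m ∧ |n - sx| + max 0 (max (1 - sy) (sy - m)) ≤ d)
    · rw [if_neg (fun h => hC (hA.mp h)), if_pos (hB.mpr hD), if_pos (Or.inr hD)]
    · rw [if_neg (fun h => hC (hA.mp h)), if_neg (fun h => hD (hB.mp h)),
          if_neg (fun h => h.elim hC hD)]
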